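-- pv_equiv track=rewrite | github.com/romanovamar/bio-python | task2.py | makeShell
-- ===== SOURCE A (Python) =====
-- def makeShell(n):
--     f = 0
--     a = []
--     for i in range(2 * n - 1):
--         if i < n:
--             f += 1
--             a.append(f * [0])
--         if i >= n:
--             f -= 1
--             a.append(f * [0])
--     return a
-- ===== SOURCE B (Python) =====
-- def makeShell(n):
--     return [min(i + 1, 2 * n - 1 - i) * [0] for i in range(2 * n - 1)]
-- ===== Notes on version B (the rewrite author's own statement) =====
-- stated objective: simpler
-- what changed: Replaces the stateful loop with a mutable counter and its two branch cases by a single comprehension that computes each row's length in closed form as the minimum of the distances to the two ends of the index range.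
import Mathlib
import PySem

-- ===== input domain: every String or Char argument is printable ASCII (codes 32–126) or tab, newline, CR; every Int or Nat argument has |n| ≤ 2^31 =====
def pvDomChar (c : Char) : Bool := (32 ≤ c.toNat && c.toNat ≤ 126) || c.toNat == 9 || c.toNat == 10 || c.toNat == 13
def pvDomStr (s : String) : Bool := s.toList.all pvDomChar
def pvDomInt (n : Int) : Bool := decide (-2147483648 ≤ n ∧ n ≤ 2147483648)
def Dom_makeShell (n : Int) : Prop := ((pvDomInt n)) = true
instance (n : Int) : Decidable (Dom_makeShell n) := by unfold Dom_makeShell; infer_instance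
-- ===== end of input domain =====

-- B replaces the mutable-counter loop by a closed-form row length per index; objective: simpler.

-- ===== PORT A =====
-- loop body of A: both independent ifs, state (f, a)
def makeShellStep (n : Int) (st : Int × List (List Int)) (i : Int) : Int × List (List Int) :=
  let st1 := if i < n then (st.1 + 1, st.2 ++ [PySem.List.pyRepeat [(0 : Int)] (st.1 + 1)]) else st
  if i ≥ n then (st1.1 - 1, st1.2 ++ [PySem.List.pyRepeat [(0 : Int)] (st1.1 - 1)]) else st1

def makeShell (n : Int) : List (List Int) :=
  ((PySem.List.pyRange 0 (2 * n - 1) 1).foldl (makeShellStep n) (0, [])).2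

-- ===== PORT B =====
def makeShell_alt (n : Int) : List (List Int) :=
  (PySem.List.pyRange 0 (2 * n - 1) 1).map
    (fun i => PySem.List.pyRepeat [(0 : Int)] (min (i + 1) (2 * n - 1 - i)))

-- ===== PRECONDITION & SPEC =====
def Spec_makeShell (n : Int) (out : List (List Int)) : Prop := out = makeShell_alt n
instance (n : Int) (out : List (List Int)) : Decidable (Spec_makeShell n out) := by unfold Spec_makeShell; infer_instance

-- ===== CLAIM (what is proved, stated in full; the proofs are below) =====
def Claim_equal_makeShell : Prop := ∀ (n : Int), Dom_makeShell n → Spec_makeShell n (makeShell n)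

-- ===== LEMMAS AND PROOFS =====

-- ascending half: indices a..n-1, counter entering index i equals i
theorem makeShell_foldl_asc (n : Int) : ∀ (k : Nat) (a : Int) (acc : List (List Int)),
    (n - a).toNat = k → a ≤ n →
    (PySem.List.pyRange a n 1).foldl (makeShellStep n) (a, acc) =
      (n, acc ++ (PySem.List.pyRange a n 1).map (fun i => PySem.List.pyRepeat [(0 : Int)] (i + 1))) := by
  intro k
  induction k with
  | zero =>
    intro a acc hk ha
    have : a = n := by omega
    subst this
    simp [PySem.List.pyRange_one_eq_nil le_rfl]
  | succ m ih =>
    intro a acc hk ha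
    have hlt : a < n := by omega
    rw [PySem.List.pyRange_one_cons hlt]
    simp only [List.foldl_cons, List.map_cons]
    have hstep : makeShellStep n (a, acc) a =
        (a + 1, acc ++ [PySem.List.pyRepeat [(0 : Int)] (a + 1)]) := by
      simp [makeShellStep, hlt, not_le.mpr hlt]
    rw [hstep, ih (a + 1) _ (by omega) (by omega)]
    simp

-- descending half: indices a..2n-2 with a ≥ n, counter entering index i equals 2n - i
theorem makeShell_foldl_desc (n : Int) : ∀ (k : Nat) (a : Int) (acc : List (List Int)),
    (2 * n - 1 - a).toNat = k → n ≤ a →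
    ((PySem.List.pyRange a (2 * n - 1) 1).foldl (makeShellStep n) (2 * n - a, acc)).2 =
      acc ++ (PySem.List.pyRange a (2 * n - 1) 1).map
        (fun i => PySem.List.pyRepeat [(0 : Int)] (2 * n - 1 - i)) := by
  intro k
  induction k with
  | zero =>
    intro a acc hk ha
    have : 2 * n - 1 ≤ a := by omega
    simp [PySem.List.pyRange_one_eq_nil this]
  | succ m ih =>
    intro a acc hk ha
    have hlt : a < 2 * n - 1 := by omega
    rw [PySem.List.pyRange_one_cons hlt]
    simp only [List.foldl_cons, List.map_cons]
    have hstep : makeShellStep n (2 * n - a, acc) a =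
        (2 * n - a - 1, acc ++ [PySem.List.pyRepeat [(0 : Int)] (2 * n - a - 1)]) := by
      simp [makeShellStep, not_lt.mpr ha, ha]
    rw [hstep]
    have : (2 : Int) * n - a - 1 = 2 * n - (a + 1) := by ring
    rw [this, ih (a + 1) _ (by omega) (by omega)]
    have : (2 : Int) * n - 1 - a = 2 * n - (a + 1) := by ring
    simp [this]

-- ===== VERDICT (by name: the statement is the Claim_ definition above) =====
theorem makeShell_spec : Claim_equal_makeShell := by
  intro n _
  unfold Spec_makeShell makeShell makeShell_alt
  by_cases hn : n ≤ 0
  · rw [PySem.List.pyRange_one_eq_nil (by omega)]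
    simp
  · push_neg at hn
    rw [PySem.List.pyRange_one_append 0 n (2 * n - 1) (by omega) (by omega)]
    rw [List.foldl_append, List.map_append]
    rw [makeShell_foldl_asc n (n - 0).toNat 0 [] rfl (by omega)]
    have hn2 : (n : Int) = 2 * n - n := by ring
    rw [show ((n : Int), ([] : List (List Int)) ++ (PySem.List.pyRange 0 n 1).map (fun i => PySem.List.pyRepeat [(0 : Int)] (i + 1))) = (2 * n - n, [] ++ (PySem.List.pyRange 0 n 1).map (fun i => PySem.List.pyRepeat [(0 : Int)] (i + 1))) from by rw [← hn2]]
    rw [makeShell_foldl_desc n (2 * n - 1 - n).toNat n _ rfl le_rfl]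
    simp only [List.nil_append]
    congr 1
    · exact List.map_congr_left (fun i hi => by
        have := (PySem.List.mem_pyRange_one).1 hi
        have : min (i + 1) (2 * n - 1 - i) = i + 1 := by omega
        rw [this])
    · exact (List.map_congr_left (fun i hi => by
        have := (PySem.List.mem_pyRange_one).1 hi
        have : min (i + 1) (2 * n - 1 - i) = 2 * n - 1 - i := by omega
        rw [this]))
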